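-- pv_equiv track=rewrite | github.com/FraFabbri/bazingabot | chatbot_data/modules/Enriching.py | look_for_bigger
-- ===== SOURCE A (Python) =====
-- def look_for_bigger(string, lst, idx, lst_concepts, first):
--     """
--     """
--     if string in lst_concepts:
--         return 'UNK'
--     else:
--         idx +=1
--         if idx == len(lst):
--             return first
--         string = string + ' ' + lst[idx]
--         if len(string.split()) == len(lst):
--             return first
--         if string in lst_concepts:
--             return string
--         else:
--             return look_for_bigger(string, lst, idx, lst_concepts, first)
-- ===== SOURCE B (Python) =====
-- def look_for_bigger(string, lst, idx, lst_concepts, first):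
--     # Explicit loop over the remaining tokens, keeping the pieces in a list and
--     # joining them for each candidate; concept membership via a hoisted set.
--     if string in lst_concepts:
--         return 'UNK'
--     n = len(lst)
--     concepts = set(lst_concepts)
--     parts = [string]
--     i = idx
--     while True:
--         i += 1
--         if i == n:
--             return first
--         parts.append(lst[i])
--         cand = ' '.join(parts)
--         if len(cand.split()) == n:
--             return first
--         if cand in concepts:
--             return cand
-- ===== Notes on version B (the rewrite author's own statement) =====
-- stated objective: alternative
-- what changed: A's tail recursion (rebuilding one growing string and re-checking the entry condition per call) becomes a single explicit while-loop whose state is a list of pieces joined per candidate, with the concept list hoisted into a set built once and the 'UNK' check done once before the loop.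
import Mathlib
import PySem

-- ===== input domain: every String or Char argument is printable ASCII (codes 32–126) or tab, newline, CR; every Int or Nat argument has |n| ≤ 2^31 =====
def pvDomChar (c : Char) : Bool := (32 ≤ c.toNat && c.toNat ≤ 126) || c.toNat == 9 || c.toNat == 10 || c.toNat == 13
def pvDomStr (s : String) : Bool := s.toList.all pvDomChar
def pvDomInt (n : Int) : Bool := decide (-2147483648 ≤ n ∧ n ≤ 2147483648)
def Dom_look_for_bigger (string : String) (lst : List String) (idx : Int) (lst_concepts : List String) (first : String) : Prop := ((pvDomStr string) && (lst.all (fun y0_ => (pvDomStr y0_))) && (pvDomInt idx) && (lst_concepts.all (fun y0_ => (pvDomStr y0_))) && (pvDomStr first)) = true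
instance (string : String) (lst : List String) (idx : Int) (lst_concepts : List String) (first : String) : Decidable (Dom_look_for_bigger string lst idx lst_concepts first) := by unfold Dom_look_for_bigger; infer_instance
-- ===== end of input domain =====

-- B replaces A's tail recursion by an explicit loop that keeps the pieces in a list and joins
-- them per candidate, with concept membership via a hoisted set (objective: alternative).

-- ===== PORT A =====
-- literal transliteration of A; the recursion carries the guard 'idx1 < len' only to be
-- total: Python raises IndexError exactly on the inputs Pre_ excludes.
def look_for_bigger (string : String) (lst : List String) (idx : Int) (lst_concepts : List String) (first : String) : String :=
  if lst_concepts.contains string then "UNK"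
  else
    let idx1 := idx + 1
    if idx1 = (lst.length : Int) then first
    else
      let string1 := string ++ " " ++ PySem.List.pyGetD lst idx1 ""
      if (PySem.Str.split₀ string1).length = lst.length then first
      else if lst_concepts.contains string1 then string1
      else if _h : idx1 < (lst.length : Int) then
        look_for_bigger string1 lst idx1 lst_concepts first
      else first
termination_by ((lst.length : Int) - idx).toNat
decreasing_by omega

-- ===== PORT B =====
-- the 'while True' loop of Source B; state = pieces list and running index (same totality guard)
def lfbLoop (lst : List String) (n : Int) (concepts : PySem.Set String) (first : String) (parts : List String) (i : Int) : String :=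
  let i1 := i + 1
  if i1 = n then first
  else
    let parts1 := parts ++ [PySem.List.pyGetD lst i1 ""]
    let cand := PySem.Str.join " " parts1
    if ((PySem.Str.split₀ cand).length : Int) = n then first
    else if concepts.contains cand then cand
    else if _h : i1 < n then lfbLoop lst n concepts first parts1 i1
    else first
termination_by (n - i).toNat
decreasing_by omega

def look_for_bigger_alt (string : String) (lst : List String) (idx : Int) (lst_concepts : List String) (first : String) : String :=
  if (PySem.Set.ofList lst_concepts).contains string then "UNK"
  else lfbLoop lst (lst.length : Int) (PySem.Set.ofList lst_concepts) first [string] idx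

-- ===== PRECONDITION & SPEC =====
-- Pre_ excludes exactly the inputs on which Python's lst[idx] raises IndexError
-- (A returns normally on every input admitted here).
def Pre_look_for_bigger (string : String) (lst : List String) (idx : Int) (lst_concepts : List String) (first : String) : Prop :=
  lst_concepts.contains string = true ∨ (-(lst.length : Int) - 1 ≤ idx ∧ idx < (lst.length : Int))
instance (string : String) (lst : List String) (idx : Int) (lst_concepts : List String) (first : String) : Decidable (Pre_look_for_bigger string lst idx lst_concepts first) := by unfold Pre_look_for_bigger; infer_instance

def pvWitness_look_for_bigger : String × List String × Int × List String × String :=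
  ("big", ["big", "bang", "theory"], 0, ["big bang"], "big")

def Spec_look_for_bigger (string : String) (lst : List String) (idx : Int) (lst_concepts : List String) (first : String) (out : String) : Prop := out = look_for_bigger_alt string lst idx lst_concepts first
instance (string : String) (lst : List String) (idx : Int) (lst_concepts : List String) (first : String) (out : String) : Decidable (Spec_look_for_bigger string lst idx lst_concepts first out) := by unfold Spec_look_for_bigger; infer_instance

-- ===== CLAIM (what is proved, stated in full; the proofs are below) =====
def Claim_equal_look_for_bigger : Prop := ∀ (string : String) (lst : List String) (idx : Int) (lst_concepts : List String) (first : String), Dom_look_for_bigger string lst idx lst_concepts first → Pre_look_for_bigger string lst idx lst_concepts first → Spec_look_for_bigger string lst idx lst_concepts first (look_for_bigger string lst idx lst_concepts first)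

-- ===== LEMMAS AND PROOFS =====

theorem str_toList_inj (a b : String) (h : a.toList = b.toList) : a = b := by
  have := congrArg String.ofList h; simpa using this

theorem contains_ofList_eq (l : List String) (x : String) :
    (PySem.Set.ofList l).contains x = l.contains x := by
  by_cases h : x ∈ l <;> simp [h, PySem.Set.mem_ofList, PySem.Set.contains]

theorem chars_join_append (ps : List (List Char)) (w : List Char) (h : ps ≠ []) :
    PySem.Chars.join [' '] (ps ++ [w]) = PySem.Chars.join [' '] ps ++ ' ' :: w := by
  induction ps with
  | nil => exact absurd rfl h
  | cons p qs ih =>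
    cases qs with
    | nil => simp [PySem.Chars.join, List.intercalate, List.intersperse]
    | cons q rs =>
      have ih' := ih (by simp)
      simp only [List.cons_append] at ih' ⊢
      simp only [PySem.Chars.join_cons_cons, ih']
      simp

theorem join_append_singleton (parts : List String) (w : String) (h : parts ≠ []) :
    PySem.Str.join " " (parts ++ [w]) = PySem.Str.join " " parts ++ " " ++ w := by
  apply str_toList_inj
  have hc := chars_join_append (parts.map String.toList) w.toList (by simpa using h)
  simp [hc]

theorem join_singleton (s : String) : PySem.Str.join " " [s] = s := by
  simp [PySem.Str.join]

theorem loop_eq (lst lst_concepts : List String) (first : String) :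
    ∀ (k : Nat) (idx : Int) (string : String) (parts : List String),
      ((lst.length : Int) - idx).toNat = k →
      parts ≠ [] →
      PySem.Str.join " " parts = string →
      lst_concepts.contains string = false →
      look_for_bigger string lst idx lst_concepts first
        = lfbLoop lst (lst.length : Int) (PySem.Set.ofList lst_concepts) first parts idx := by
  intro k
  induction k using Nat.strong_induction_on with
  | _ k ih =>
    intro idx string parts hk hne hjoin hmem
    have hcand : PySem.Str.join " " (parts ++ [PySem.List.pyGetD lst (idx+1) ""])
        = string ++ " " ++ PySem.List.pyGetD lst (idx+1) "" := by
      rw [join_append_singleton parts _ hne, hjoin]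
    rw [look_for_bigger, lfbLoop]
    simp only [hmem, Bool.false_eq_true, if_false, hcand, contains_ofList_eq, Nat.cast_inj]
    split_ifs with h1 h2 h3 h4 <;> try rfl
    exact ih ((lst.length : Int) - (idx + 1)).toNat (by omega) (idx + 1) _ _ rfl
      (by simp) hcand (by simpa using h3)

-- ===== VERDICT (by name: the statement is the Claim_ definition above) =====
theorem look_for_bigger_spec : Claim_equal_look_for_bigger := by
  intro string lst idx lst_concepts first _hdom _hpre
  unfold Spec_look_for_bigger look_for_bigger_alt
  rw [contains_ofList_eq]
  by_cases h : lst_concepts.contains string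
  · have h' : string ∈ lst_concepts := by simpa using h
    simp [look_for_bigger, h']
  · simp only [h, if_neg, Bool.not_eq_true]
    exact loop_eq lst lst_concepts first ((lst.length : Int) - idx).toNat idx string [string]
      rfl (by simp) (join_singleton string) (by simpa using h)
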